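-- pv_equiv track=rewrite | github.com/PSEngineering-VN/NetworkConfig | scripts/build_mac_profile_db.py | get_interface_blocks
-- ===== SOURCE A (Python) =====
-- def get_interface_blocks(show_run):
--     blocks = {}
--     current_int = None
--     lines = show_run.splitlines()
--     for i, line in enumerate(lines):
--         if line.startswith("interface"):
--             current_int = line.strip().split()[1]
--             blocks[current_int] = [line]
--         elif current_int:
--             if line.startswith("!"):
--                 current_int = None
--             else:
--                 blocks[current_int].append(line)
--     return blocks
-- ===== SOURCE B (Python) =====
-- def get_interface_blocks(show_run):
--     lines = show_run.splitlines()
--     blocks = {}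
--     n = len(lines)
--     i = 0
--     while i < n:
--         line = lines[i]
--         if line.startswith("interface"):
--             name = line.strip().split()[1]
--             block = [line]
--             i += 1
--             while i < n and not lines[i].startswith("!") and not lines[i].startswith("interface"):
--                 block.append(lines[i])
--                 i += 1
--             blocks[name] = block
--         else:
--             i += 1
--     return blocks
-- ===== Notes on version B (the rewrite author's own statement) =====
-- stated objective: alternative
-- what changed: Replaces A's single-pass state machine (current_int flag with per-line dict mutation: blocks[k]=[line] then repeated append) by a block-at-a-time nested scan: when an 'interface' line is found, an inner loop consumes the whole block until '!' or the next 'interface' line, and the completed block is inserted into the dict once.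
import Mathlib
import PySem

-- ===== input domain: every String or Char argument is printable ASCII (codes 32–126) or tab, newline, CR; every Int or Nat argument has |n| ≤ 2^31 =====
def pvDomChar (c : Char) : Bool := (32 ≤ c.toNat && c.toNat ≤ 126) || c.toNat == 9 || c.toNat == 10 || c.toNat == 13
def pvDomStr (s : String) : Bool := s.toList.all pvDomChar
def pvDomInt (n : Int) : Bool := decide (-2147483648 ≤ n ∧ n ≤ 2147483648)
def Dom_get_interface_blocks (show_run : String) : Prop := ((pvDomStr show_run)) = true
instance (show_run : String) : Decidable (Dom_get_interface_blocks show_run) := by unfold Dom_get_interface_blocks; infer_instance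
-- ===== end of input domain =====

-- B parses block-at-a-time: a nested scan consumes each interface block and inserts it once,
-- replacing A's single-pass current_int state machine with per-line dict mutation (alternative).


-- ===== PORT A =====
-- A's loop body.  The enumerate index i is unused in A, so the fold ranges over the lines
-- directly.  `elif current_int:` tests truthiness of None-or-a-split()-token; split() tokens
-- are never empty, so matching on the Option is exact.  `blocks[current_int].append(line)`
-- is Dict.modify with default []: exact because the key was inserted when current_int was
-- set, so the default branch (Python's KeyError) is unreachable.
def pvStepA (st : PySem.Dict String (List String) × Option String) (line : String) :
    PySem.Dict String (List String) × Option String :=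
  if PySem.Str.startswith line "interface" then
    match PySem.List.pyGet? (PySem.Str.split₀ (PySem.Str.strip line)) 1 with
    | none => st        -- Python raises IndexError here; excluded by Pre_
    | some k => (st.1.insert k [line], some k)
  else
    match st.2 with
    | some k =>
      if PySem.Str.startswith line "!" then (st.1, none)
      else (st.1.modify k [] (fun b => b ++ [line]), some k)
    | none => st

def get_interface_blocks (show_run : String) : List (String × List String) :=
  (((PySem.Str.splitlines show_run).foldl pvStepA (PySem.Dict.empty, none)).1).items

-- ===== PORT B =====
-- B's inner while loop: collect body lines until a line starting with '!' or the next
-- 'interface' line (neither is consumed); returns (block body, remaining lines).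
def pvScanBlock : List String → List String × List String
  | [] => ([], [])
  | l :: rest =>
    if PySem.Str.startswith l "!" || PySem.Str.startswith l "interface" then ([], l :: rest)
    else ((l :: (pvScanBlock rest).1), (pvScanBlock rest).2)

-- needed by pvParseB's termination proof
theorem pvScanBlock_snd_length (ls : List String) : (pvScanBlock ls).2.length ≤ ls.length := by
  induction ls with
  | nil => simp [pvScanBlock]
  | cons l rest ih =>
    simp only [pvScanBlock]
    split
    · simp
    · exact Nat.le_succ_of_le ih

-- name = line.strip().split()[1]  (none = Python's IndexError; excluded by Pre_)
def pvKey? (l : String) : Option String :=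
  PySem.List.pyGet? (PySem.Str.split₀ (PySem.Str.strip l)) 1

-- B's outer while loop over the remaining lines.
def pvParseB (blocks : PySem.Dict String (List String)) : List String → PySem.Dict String (List String)
  | [] => blocks
  | l :: rest =>
    match PySem.Str.startswith l "interface", pvKey? l with
    | true, some k => pvParseB (blocks.insert k (l :: (pvScanBlock rest).1)) (pvScanBlock rest).2
    | true, none => pvParseB blocks rest   -- Python raises IndexError here; excluded by Pre_
    | false, _ => pvParseB blocks rest
termination_by ls => ls.length
decreasing_by
  · exact Nat.lt_succ_of_le (pvScanBlock_snd_length rest)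
  · exact Nat.lt_succ_of_le (Nat.le_refl _)

def get_interface_blocks_alt (show_run : String) : List (String × List String) :=
  (pvParseB PySem.Dict.empty (PySem.Str.splitlines show_run)).items

-- ===== PRECONDITION & SPEC =====
-- Pre_ excludes exactly the inputs on which A raises IndexError: a line that starts with
-- "interface" but has fewer than two whitespace-separated tokens (B raises there too).
def Pre_get_interface_blocks (show_run : String) : Prop :=
  ∀ l ∈ PySem.Str.splitlines show_run, PySem.Str.startswith l "interface" = true →
    2 ≤ (PySem.Str.split₀ (PySem.Str.strip l)).length
instance (show_run : String) : Decidable (Pre_get_interface_blocks show_run) := by unfold Pre_get_interface_blocks; infer_instance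

def pvWitness_get_interface_blocks : String :=
  "interface Gi0/1\n ip address 10.0.0.1\n!\ninterface Vlan10\n desc x"

def Spec_get_interface_blocks (show_run : String) (out : List (String × List String)) : Prop := out = get_interface_blocks_alt show_run
instance (show_run : String) (out : List (String × List String)) : Decidable (Spec_get_interface_blocks show_run out) := by unfold Spec_get_interface_blocks; infer_instance

-- ===== CLAIM (what is proved, stated in full; the proofs are below) =====
def Claim_equal_get_interface_blocks : Prop := ∀ (show_run : String), Dom_get_interface_blocks show_run → Pre_get_interface_blocks show_run → Spec_get_interface_blocks show_run (get_interface_blocks show_run)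

-- ===== LEMMAS AND PROOFS =====

-- the precondition restricted to a list of lines
def pvPreLines (ls : List String) : Prop :=
  ∀ l ∈ ls, PySem.Str.startswith l "interface" = true →
    2 ≤ (PySem.Str.split₀ (PySem.Str.strip l)).length

-- step lemmas for A's loop body
theorem pvStepA_interface (st : PySem.Dict String (List String) × Option String)
    (l k : String) (hint : PySem.Str.startswith l "interface" = true)
    (hk : PySem.List.pyGet? (PySem.Str.split₀ (PySem.Str.strip l)) 1 = some k) :
    pvStepA st l = (st.1.insert k [l], some k) := by
  rw [pvStepA, hint, hk]
  rfl

theorem pvStepA_none (d : PySem.Dict String (List String)) (l : String)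
    (hint : PySem.Str.startswith l "interface" = false) :
    pvStepA (d, none) l = (d, none) := by
  rw [pvStepA, hint, if_neg Bool.false_ne_true]

theorem pvStepA_bang (d : PySem.Dict String (List String)) (l k : String)
    (hint : PySem.Str.startswith l "interface" = false)
    (hbang : PySem.Str.startswith l "!" = true) :
    pvStepA (d, some k) l = (d, none) := by
  rw [pvStepA, hint, if_neg Bool.false_ne_true]
  show (if PySem.Str.startswith l "!" = true then (d, none) else _) = (d, none)
  rw [hbang, if_pos rfl]

theorem pvStepA_body (d : PySem.Dict String (List String)) (l k : String)
    (hint : PySem.Str.startswith l "interface" = false)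
    (hbang : PySem.Str.startswith l "!" = false) :
    pvStepA (d, some k) l = (d.modify k [] (fun b => b ++ [l]), some k) := by
  rw [pvStepA, hint, if_neg Bool.false_ne_true]
  show (if PySem.Str.startswith l "!" = true then _ else (d.modify k [] fun b => b ++ [l], some k)) = _
  rw [hbang, if_neg Bool.false_ne_true]

-- A's insert-then-append equals B's one insert of the grown block
theorem pvInsertModify (d : PySem.Dict String (List String)) (k : String)
    (acc : List String) (l : String) :
    (d.insert k acc).modify k [] (fun b => b ++ [l]) = d.insert k (acc ++ [l]) := by
  rw [PySem.Dict.modify, PySem.Dict.getD_insert_self, PySem.Dict.insert_insert_self]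

-- unfolding lemmas for B's outer loop
theorem pvParseB_nil (d : PySem.Dict String (List String)) : pvParseB d [] = d := by
  rw [pvParseB]

theorem pvParseB_cons_key (d : PySem.Dict String (List String)) (l k : String)
    (rest : List String) (hint : PySem.Str.startswith l "interface" = true)
    (hk : pvKey? l = some k) :
    pvParseB d (l :: rest) =
      pvParseB (d.insert k (l :: (pvScanBlock rest).1)) (pvScanBlock rest).2 := by
  rw [pvParseB, hint, hk]

theorem pvParseB_cons_skip (d : PySem.Dict String (List String)) (l : String)
    (rest : List String) (hint : PySem.Str.startswith l "interface" = false) :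
    pvParseB d (l :: rest) = pvParseB d rest := by
  rw [pvParseB, hint]

theorem pvKey?_some (l : String) (h : 2 ≤ (PySem.Str.split₀ (PySem.Str.strip l)).length) :
    ∃ k, pvKey? l = some k := by
  unfold pvKey? PySem.List.pyGet? PySem.List.pyIdx?
  rw [if_pos (by norm_num),
    if_pos (by exact_mod_cast by omega :
      (1:Int) < ((PySem.Str.split₀ (PySem.Str.strip l)).length : Int))]
  simp only [Option.bind_some, Int.toNat_one]
  have h1 : (1:Nat) < (PySem.Str.split₀ (PySem.Str.strip l)).length := by omega
  exact ⟨(PySem.Str.split₀ (PySem.Str.strip l))[1], List.getElem?_eq_getElem h1⟩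

-- the loop invariant: A scanning with current_int = None equals B's outer loop, and A
-- collecting into key k (whose block so far is acc) equals B finishing that block first.
theorem pvMain (ls : List String) (h : pvPreLines ls) :
    (∀ (d : PySem.Dict String (List String)),
      (ls.foldl pvStepA (d, none)).1 = pvParseB d ls) ∧
    (∀ (d : PySem.Dict String (List String)) (k : String) (acc : List String),
      (ls.foldl pvStepA (d.insert k acc, some k)).1 =
        pvParseB (d.insert k (acc ++ (pvScanBlock ls).1)) (pvScanBlock ls).2) := by
  induction ls with
  | nil =>
    constructor
    · intro d; rw [List.foldl_nil, pvParseB_nil]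
    · intro d k acc
      rw [List.foldl_nil, pvScanBlock, pvParseB_nil, List.append_nil]
  | cons l rest ih =>
    have hrest : pvPreLines rest := fun x hx => h x (List.mem_cons_of_mem _ hx)
    have ih' := ih hrest
    by_cases hint : PySem.Str.startswith l "interface" = true
    · have hlen : 2 ≤ (PySem.Str.split₀ (PySem.Str.strip l)).length :=
        h l List.mem_cons_self hint
      obtain ⟨k', hk'⟩ := pvKey?_some l hlen
      have hscan : pvScanBlock (l :: rest) = ([], l :: rest) := by
        rw [pvScanBlock, hint]
        simp
      constructor
      · intro d
        rw [List.foldl_cons, pvStepA_interface _ l k' hint hk',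
          pvParseB_cons_key d l k' rest hint hk']
        simpa using ih'.2 d k' [l]
      · intro d k acc
        rw [List.foldl_cons, pvStepA_interface _ l k' hint hk', hscan]
        show (List.foldl pvStepA ((d.insert k acc).insert k' [l], some k') rest).1 =
          pvParseB (d.insert k (acc ++ [])) (l :: rest)
        rw [pvParseB_cons_key _ l k' rest hint hk']
        have := ih'.2 (d.insert k (acc ++ [])) k' [l]
        simpa using this
    · rw [Bool.not_eq_true] at hint
      by_cases hbang : PySem.Str.startswith l "!" = true
      · have hscan : pvScanBlock (l :: rest) = ([], l :: rest) := by
          rw [pvScanBlock, hbang]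
          simp
        constructor
        · intro d
          rw [List.foldl_cons, pvStepA_none d l hint, pvParseB_cons_skip d l rest hint,
            ih'.1 d]
        · intro d k acc
          rw [List.foldl_cons, pvStepA_bang _ l k hint hbang, ih'.1 (d.insert k acc), hscan]
          show pvParseB (d.insert k acc) rest = pvParseB (d.insert k (acc ++ [])) (l :: rest)
          rw [pvParseB_cons_skip _ l rest hint, List.append_nil]
      · rw [Bool.not_eq_true] at hbang
        have hscan : pvScanBlock (l :: rest) =
            (l :: (pvScanBlock rest).1, (pvScanBlock rest).2) := by
          rw [pvScanBlock, hbang, hint]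
          simp
        constructor
        · intro d
          rw [List.foldl_cons, pvStepA_none d l hint, pvParseB_cons_skip d l rest hint,
            ih'.1 d]
        · intro d k acc
          rw [List.foldl_cons, pvStepA_body _ l k hint hbang, pvInsertModify,
            ih'.2 d k (acc ++ [l]), hscan]
          simp

-- ===== VERDICT (by name: the statement is the Claim_ definition above) =====
theorem get_interface_blocks_spec : Claim_equal_get_interface_blocks := by
  intro s _ hpre
  unfold Spec_get_interface_blocks get_interface_blocks get_interface_blocks_alt
  exact congrArg PySem.Dict.items ((pvMain (PySem.Str.splitlines s) hpre).1 PySem.Dict.empty)
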